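-- pv_equiv track=rewrite | github.com/huggingface/transformers | src/transformers/models/nougat/tokenization_nougat_fast.py | truncate_repetitions
-- ===== SOURCE A (Python) =====
-- def find_next_punctuation(s: str, start_inx=0):
--     """
--     Find the index of the next punctuation mark
--
--     Args:
--         s: String to examine
--         start_inx: Index where to start
--     """
--
--     for i in range(start_inx, len(s)):
--         if s[i] in [".", "?", "!", "\n"]:
--             return i
--
--     return None
--
-- def find_last_punctuation(s: str, start_inx=0):
--     """
--     Find the index of the last punctuation mark before start_inx
--
--     Args:
--         s: String to examine
--         start_inx: Index where to look before
--     """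
--
--     for i in range(start_inx - 1, 0, -1):
--         if s[i] in [".", "?", "!", "\n"]:
--             return i
--
--     return None
--
-- def truncate_repetitions(s: str, min_len=30):
--     """
--     Attempt to truncate repeating segments in the input string.
--
--     This function looks for the longest repeating substring at the end of the input string and truncates it to appear
--     only once. To be considered for removal, repetitions need to be continuous.
--
--     Args:
--         s (str): The input raw prediction to be truncated.
--         min_len (int): The minimum length of the repeating segment.
--
--     Returns:
--         str: The input string with repeated segments truncated.
--     """
--     s_lower = s.lower()
--     s_len = len(s_lower)
--
--     if s_len < 2 * min_len:
--         return s
--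
--     # try to find a length at which the tail is repeating
--     max_rep_len = None
--     for rep_len in range(min_len, int(s_len / 2)):
--         # check if there is a repetition at the end
--         same = True
--         for i in range(0, rep_len):
--             if s_lower[s_len - rep_len - i - 1] != s_lower[s_len - i - 1]:
--                 same = False
--                 break
--
--         if same:
--             max_rep_len = rep_len
--
--     if max_rep_len is None:
--         return s
--
--     lcs = s_lower[-max_rep_len:]
--
--     # remove all but the last repetition
--     st = s
--     st_lower = s_lower
--     while st_lower.endswith(lcs):
--         st = st[:-max_rep_len]
--         st_lower = st_lower[:-max_rep_len]
--
--     # this is the tail with the repetitions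
--     repeating_tail = s_lower[len(st_lower) :]
--
--     # add until next punctuation and make sure last sentence is not repeating
--     st_lower_out = st_lower
--     while True:
--         sentence_end = find_next_punctuation(s_lower, len(st_lower_out))
--         sentence_start = find_last_punctuation(s_lower, len(st_lower_out))
--         if sentence_end and sentence_start:
--             sentence = s_lower[sentence_start:sentence_end]
--             st_lower_out = s_lower[: sentence_end + 1]
--             if sentence in repeating_tail:
--                 break
--         else:
--             break
--
--     s_out = s[: len(st_lower_out)]
--
--     return s_out
-- ===== SOURCE B (Python) =====
-- PUNCT = ".?!\n"
--
--
-- def _z_array(s):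
--     # Z-function: z[i] = length of the longest common prefix of s and s[i:]
--     n = len(s)
--     z = [0] * n
--     l = r = 0
--     for i in range(1, n):
--         zi = min(r - i, z[i - l]) if i < r else 0
--         while i + zi < n and s[zi] == s[i + zi]:
--             zi += 1
--         z[i] = zi
--         if i + zi > r:
--             l, r = i, i + zi
--     if n:
--         z[0] = n
--     return z
--
--
-- def truncate_repetitions(s: str, min_len=30):
--     sl = s.lower()
--     n = len(sl)
--     if n < 2 * min_len:
--         return s
--
--     # Z-function of the reversed string: the length-2k suffix of sl is a square
--     # exactly when z[k] >= k, so one linear pass answers every candidate length.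
--     rev = sl[::-1]
--     z = _z_array(rev)
--
--     k = None
--     for cand in range(min_len, n // 2):
--         if z[cand] >= cand:
--             k = cand
--     if k is None:
--         return s
--
--     # number of trailing copies of the repeating unit, read off the same z-array
--     reps = 1
--     while (reps + 1) * k <= n and z[reps * k] >= k:
--         reps += 1
--     cut = n - reps * k
--     tail = sl[cut:]
--
--     # punctuation positions computed once, then scanned
--     punct = [i for i, c in enumerate(sl) if c in PUNCT]
--
--     pos = cut
--     while True:
--         nxt = None
--         for p in punct:
--             if p >= pos:
--                 nxt = p
--                 break
--         prv = None
--         for p in punct: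
--             if 1 <= p < pos:
--                 prv = p
--         if nxt is None or prv is None:
--             break
--         pos = nxt + 1
--         if sl[prv:nxt] in tail:
--             break
--
--     return s[:pos]
-- ===== Notes on version B (the rewrite author's own statement) =====
-- stated objective: alternative
-- what changed: B replaces A's candidate-by-candidate suffix comparison with a single Z-function pass over the reversed lowercased string: the square-suffix test for every candidate length k becomes the table lookup z[k] >= k, the number of trailing copies is read off the same z-array (z[j*k] >= k) instead of A's repeated suffix stripping, and punctuation positions are collected once into an index list for the sentence loop.
-- outside the precondition, e.g. on truncate_repetitions('abab', 0): A returns '', B does not finish within the time limit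
import Mathlib
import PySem

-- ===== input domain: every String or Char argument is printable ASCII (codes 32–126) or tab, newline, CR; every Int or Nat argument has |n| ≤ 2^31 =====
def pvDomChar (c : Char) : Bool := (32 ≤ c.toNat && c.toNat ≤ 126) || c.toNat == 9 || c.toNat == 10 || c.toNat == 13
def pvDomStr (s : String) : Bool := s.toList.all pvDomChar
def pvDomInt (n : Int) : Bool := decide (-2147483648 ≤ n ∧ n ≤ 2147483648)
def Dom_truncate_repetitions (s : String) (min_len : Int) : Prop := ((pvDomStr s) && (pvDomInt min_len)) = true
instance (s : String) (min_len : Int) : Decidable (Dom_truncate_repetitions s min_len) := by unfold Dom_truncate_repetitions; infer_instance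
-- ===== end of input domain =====

-- B replaces A's quadratic per-candidate suffix comparison by one Z-function pass over the
-- reversed lowercased string: the square-suffix test for length k becomes the table lookup
-- z[k] >= k, the number of trailing copies is read off the same table (z[j*k] >= k) instead
-- of repeated suffix stripping, and punctuation positions are collected once into an index
-- list for the sentence loop.  Objective: alternative (a different algorithm, same ports' value).

-- ===== PORT A =====
def pvIsPunctA (c : Char) : Bool := ['.', '?', '!', '\n'].contains c

-- for i in range(start_inx, len(s)): if s[i] in [...]: return i; return None
def find_next_punctuation (s : List Char) (start_inx : Int) : Option Int :=
  (PySem.List.pyRange start_inx (s.length : Int) 1).find?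
    (fun i => pvIsPunctA (PySem.List.pyGetD s i ' '))

-- for i in range(start_inx - 1, 0, -1): if s[i] in [...]: return i; return None
def find_last_punctuation (s : List Char) (start_inx : Int) : Option Int :=
  (PySem.List.pyRange (start_inx - 1) 0 (-1)).find?
    (fun i => pvIsPunctA (PySem.List.pyGetD s i ' '))

-- while st_lower.endswith(lcs): st_lower = st_lower[:-max_rep_len]
-- (guards 1 ≤ k, lcs ≠ [] only make the recursion total: Python diverges there, outside Pre_)
def pvStripA (k : Int) (lcs : List Char) (st : List Char) : List Char :=
  if h : 1 ≤ k ∧ lcs ≠ [] ∧ PySem.Chars.endswith st lcs then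
    pvStripA k lcs (PySem.List.slice st none (some (-k)))
  else st
termination_by st.length
decreasing_by
  have hst : st ≠ [] := by
    intro hnil
    have := (PySem.Chars.endswith_iff st lcs).mp h.2.2
    exact h.2.1 (List.suffix_nil.mp (hnil ▸ this))
  have h1 : PySem.List.slice st none (some (-k)) = st.take (st.length - k.toNat) := by
    have : -k = -((k.toNat : Nat) : Int) := by omega
    rw [this, PySem.List.slice_to_neg_natCast _ _ (by omega)]
  rw [h1]
  have h2 : st.length ≠ 0 := by simpa using hst
  have h3 : 1 ≤ k.toNat := by omega
  have := List.length_take_le (st.length - k.toNat) st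
  simp only [List.length_take]
  omega

-- the 'while True' sentence loop of A; fuel only makes it total (pos strictly increases)
def pvLoopA (sl tail : List Char) : Nat → Int → Int
  | 0, pos => pos
  | fuel+1, pos =>
    match find_next_punctuation sl pos, find_last_punctuation sl pos with
    | some e, some b =>
      if e ≠ 0 ∧ b ≠ 0 then
        let sentence := PySem.List.slice sl (some b) (some e)
        let pos' := e + 1
        if PySem.Chars.isIn sentence tail then pos' else pvLoopA sl tail fuel pos'
      else pos
    | _, _ => pos

def truncate_repetitions (s : String) (min_len : Int) : String :=
  let sl := PySem.Chars.lower s.toList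
  let n : Int := (sl.length : Int)
  if n < 2 * min_len then s else
  let maxRep : Option Int :=
    (PySem.List.pyRange min_len (PySem.Int.floordiv n 2) 1).foldl
      (fun acc rep_len =>
        let same := (PySem.List.pyRange 0 rep_len 1).all
          (fun i => PySem.List.pyGetD sl (n - rep_len - i - 1) ' ' == PySem.List.pyGetD sl (n - i - 1) ' ')
        if same then some rep_len else acc) none
  match maxRep with
  | none => s
  | some k =>
    let lcs := PySem.List.slice sl (some (-k)) none
    let st_lower := pvStripA k lcs sl
    let repeating_tail := PySem.List.slice sl (some (st_lower.length : Int)) none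
    PySem.Str.slice s none
      (some (pvLoopA sl repeating_tail (n.toNat + 1) (st_lower.length : Int)))

-- ===== PORT B =====
def pvIsPunctB (c : Char) : Bool := ".?!\n".toList.contains c

-- nxt = first punctuation position ≥ pos (loop with break)
def pvNextB (punct : List Int) (pos : Int) : Option Int :=
  punct.find? (fun p => decide (pos ≤ p))

-- prv = last punctuation position in [1, pos) (loop keeping the last hit)
def pvPrevB (punct : List Int) (pos : Int) : Option Int :=
  punct.foldl (fun acc p => if 1 ≤ p ∧ p < pos then some p else acc) none

-- the inner 'while i + zi < n and s[zi] == s[i + zi]: zi += 1' of the Z-algorithm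
def pvZext (s : List Char) (i zi : Nat) : Nat :=
  if h : i + zi < s.length ∧ s.getD zi ' ' = s.getD (i + zi) ' ' then pvZext s i (zi + 1)
  else zi
termination_by s.length - (i + zi)
decreasing_by omega

-- one iteration of the Z-algorithm's main loop (state: z-array, box [l, r))
def pvZstep (s : List Char) (st : List Nat × Nat × Nat) (i : Nat) : List Nat × Nat × Nat :=
  let z := st.1
  let l := st.2.1
  let r := st.2.2
  let seed := if i < r then min (r - i) (z.getD (i - l) 0) else 0
  let zi := pvZext s i seed
  let z' := z.set i zi
  if r < i + zi then (z', i, i + zi) else (z', l, r)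

-- _z_array: z[i] = length of the longest common prefix of s and s[i:]
def pvZfun (s : List Char) : List Nat :=
  (((List.range' 1 (s.length - 1)).foldl (pvZstep s) (List.replicate s.length 0, 0, 0)).1).set
    0 s.length

-- while (reps+1)*k <= n and z[reps*k] >= k: reps += 1   (fuel only makes it total)
def pvRepsB (z : List Nat) (n k : Int) : Nat → Int → Int
  | 0, reps => reps
  | fuel+1, reps =>
    if (reps + 1) * k ≤ n ∧ k ≤ ((z.getD ((reps * k).toNat) 0 : Nat) : Int) then
      pvRepsB z n k fuel (reps + 1)
    else reps

-- B's sentence loop over the precomputed punctuation index list (fuel = totality)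
def pvLoopB (sl : List Char) (punct : List Int) (tail : List Char) : Nat → Int → Int
  | 0, pos => pos
  | fuel+1, pos =>
    match pvNextB punct pos, pvPrevB punct pos with
    | some nxt, some prv =>
      let pos' := nxt + 1
      if PySem.Chars.isIn (PySem.List.slice sl (some prv) (some nxt)) tail then pos'
      else pvLoopB sl punct tail fuel pos'
    | _, _ => pos

def truncate_repetitions_alt (s : String) (min_len : Int) : String :=
  let sl := PySem.Chars.lower s.toList
  let n : Int := (sl.length : Int)
  if n < 2 * min_len then s else
  -- rev = sl[::-1]  (exact: PySem.List.slice?_none_none_neg_one)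
  let z := pvZfun sl.reverse
  let kOpt : Option Int :=
    (PySem.List.pyRange min_len (PySem.Int.floordiv n 2) 1).foldl
      (fun acc cand => if cand ≤ ((z.getD cand.toNat 0 : Nat) : Int) then some cand else acc)
      none
  match kOpt with
  | none => s
  | some k =>
    let reps := pvRepsB z n k (n.toNat + 1) 1
    let cut := n - reps * k
    let tail := PySem.List.slice sl (some cut) none
    let punct := ((PySem.List.enumerate sl 0).filter (fun ic => pvIsPunctB ic.2)).map (·.1)
    PySem.Str.slice s none (some (pvLoopB sl punct tail (n.toNat + 1) cut))

-- ===== PRECONDITION & SPEC =====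
-- Pre_ excludes min_len ≤ 0, where the degenerate repetition length 0 is admitted by A's
-- rep_len range: A then diverges on some inputs and otherwise returns an accidental empty
-- result (lcs becomes the whole lowercased string), and B's own counting loop diverges there.
def Pre_truncate_repetitions (s : String) (min_len : Int) : Prop := 1 ≤ min_len
instance (s : String) (min_len : Int) : Decidable (Pre_truncate_repetitions s min_len) := by
  unfold Pre_truncate_repetitions; infer_instance

def pvWitness_truncate_repetitions : String × Int := ("blah. blah. blah. ", 2)

def Spec_truncate_repetitions (s : String) (min_len : Int) (out : String) : Prop :=
  out = truncate_repetitions_alt s min_len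
instance (s : String) (min_len : Int) (out : String) : Decidable (Spec_truncate_repetitions s min_len out) := by
  unfold Spec_truncate_repetitions; infer_instance

-- ===== CLAIM (what is proved, stated in full; the proofs are below) =====
def Claim_equal_truncate_repetitions : Prop :=
  ∀ (s : String) (min_len : Int), Dom_truncate_repetitions s min_len →
    Pre_truncate_repetitions s min_len →
    Spec_truncate_repetitions s min_len (truncate_repetitions s min_len)


-- ===== LEMMAS AND PROOFS =====

-- foldl that keeps the last hit = find? on the reversed list
theorem pvFoldLast (l : List Int) (P : Int → Prop) [DecidablePred P] (init : Option Int) :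
    l.foldl (fun a k => if P k then some k else a) init =
      (l.reverse.find? (fun k => decide (P k))).orElse (fun _ => init) := by
  induction l generalizing init with
  | nil => simp
  | cons x xs ih =>
    simp only [List.foldl_cons, List.reverse_cons, List.find?_append, ih]
    by_cases h : P x <;>
      cases hf : xs.reverse.find? (fun k => decide (P k)) <;> simp [h, Option.orElse]

-- find? only looks at the predicate on members
theorem pvFindCongr (l : List Int) (p q : Int → Bool) (h : ∀ x ∈ l, p x = q x) :
    l.find? p = l.find? q := by
  induction l with
  | nil => rfl
  | cons x xs ih =>
    rcases hq : q x with _ | _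
    · rw [List.find?_cons_of_neg (by simp [h x (by simp), hq]),
        List.find?_cons_of_neg (by simp [hq])]
      exact ih (fun y hy => h y (by simp [hy]))
    · rw [List.find?_cons_of_pos (by simp [h x (by simp), hq]),
        List.find?_cons_of_pos (by simp [hq])]

-- on a sorted-ascending list, the first element satisfying a downward-closed-complement
-- predicate that `a` satisfies is `a` itself
theorem pvFindSorted (l : List Int) (P : Int → Bool) (a : Int)
    (hs : l.Pairwise (· < ·)) (ha : a ∈ l) (hPa : P a = true)
    (hlt : ∀ x, x < a → P x = false) : l.find? P = some a := by
  induction l with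
  | nil => cases ha
  | cons x xs ih =>
    rcases List.mem_cons.mp ha with rfl | hmem
    · rw [List.find?_cons_of_pos hPa]
    · have hxa : x < a := (List.pairwise_cons.mp hs).1 a hmem
      rw [List.find?_cons_of_neg (by simp [hlt x hxa])]
      exact ih (List.pairwise_cons.mp hs).2 hmem

-- descending twin of pvFindSorted
theorem pvFindSortedD (l : List Int) (P : Int → Bool) (a : Int)
    (hs : l.Pairwise (· > ·)) (ha : a ∈ l) (hPa : P a = true)
    (hgt : ∀ x, a < x → P x = false) : l.find? P = some a := by
  induction l with
  | nil => cases ha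
  | cons x xs ih =>
    rcases List.mem_cons.mp ha with rfl | hmem
    · rw [List.find?_cons_of_pos hPa]
    · have hxa : a < x := (List.pairwise_cons.mp hs).1 a hmem
      rw [List.find?_cons_of_neg (by simp [hgt x hxa])]
      exact ih (List.pairwise_cons.mp hs).2 hmem

theorem pvPunctBA : pvIsPunctB = pvIsPunctA := rfl

theorem pvGetDCons (x : Char) (xs : List Char) (i : Int) (h : 1 ≤ i) :
    PySem.List.pyGetD (x::xs) i ' ' = PySem.List.pyGetD xs (i-1) ' ' := by
  obtain ⟨m, rfl⟩ : ∃ m : Nat, i = ((m : Int) + 1) := ⟨(i-1).toNat, by omega⟩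
  have h2 : (m : Int) + 1 - 1 = ((m : Nat) : Int) := by omega
  rw [h2, show ((m : Int) + 1) = (((m+1 : Nat) : Nat) : Int) from by omega,
     PySem.List.pyGetD_natCast, PySem.List.pyGetD_natCast]
  simp [List.getD]

theorem pvGetDOut (xs : List Char) (i : Int) (h : (xs.length : Int) ≤ i) :
    PySem.List.pyGetD xs i ' ' = ' ' := by
  apply PySem.List.pyGetD_of_none
  rw [PySem.List.pyGet?_eq_none_iff, PySem.Raise.InRange]
  omega

-- B's punctuation index list, generalized over the enumerate start
def pvPunctOf (xs : List Char) (st : Int) : List Int :=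
  ((PySem.List.enumerate xs st).filter (fun ic => pvIsPunctB ic.2)).map (·.1)

theorem pvPunctOf_cons (x : Char) (xs : List Char) (st : Int) :
    pvPunctOf (x::xs) st = (if pvIsPunctB x then [st] else []) ++ pvPunctOf xs (st+1) := by
  simp only [pvPunctOf, PySem.List.enumerate_cons, List.filter_cons]
  split <;> simp_all

theorem pvMemPunctOf (xs : List Char) (st p : Int) :
    p ∈ pvPunctOf xs st ↔
      st ≤ p ∧ p < st + xs.length ∧ pvIsPunctA (PySem.List.pyGetD xs (p - st) ' ') = true := by
  induction xs generalizing st with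
  | nil =>
    simp only [pvPunctOf, PySem.List.enumerate_nil, List.filter_nil, List.map_nil,
      List.not_mem_nil, false_iff, List.length_nil]
    intro h; omega
  | cons x xs ih =>
    rw [pvPunctOf_cons]
    simp only [List.mem_append, ih]
    constructor
    · rintro (h | ⟨h1, h2, h3⟩)
      · have hx : p = st ∧ pvIsPunctB x = true := by split at h <;> simp_all
        refine ⟨by omega, by simp; omega, ?_⟩
        rw [hx.1, sub_self, PySem.List.pyGetD_zero_cons, ← pvPunctBA]
        exact hx.2
      · refine ⟨by omega, by simp; omega, ?_⟩
        rw [pvGetDCons x xs (p - st) (by omega)]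
        rw [show p - st - 1 = p - (st + 1) from by omega]
        exact h3
    · rintro ⟨h1, h2, h3⟩
      rcases eq_or_lt_of_le h1 with rfl | hlt
      · left
        rw [sub_self, PySem.List.pyGetD_zero_cons, ← pvPunctBA] at h3
        simp [h3]
      · right
        refine ⟨by omega, by simp at h2 ⊢; omega, ?_⟩
        rw [pvGetDCons x xs (p - st) (by omega)] at h3
        rw [show p - st - 1 = p - (st + 1) from by omega] at h3
        exact h3

theorem pvPunctOfSorted (xs : List Char) (st : Int) : (pvPunctOf xs st).Pairwise (· < ·) := by
  induction xs generalizing st with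
  | nil => simp [pvPunctOf, PySem.List.enumerate_nil]
  | cons x xs ih =>
    rw [pvPunctOf_cons]
    split
    · simp only [List.singleton_append, List.pairwise_cons]
      exact ⟨fun p hp => by have := (pvMemPunctOf xs (st+1) p).mp hp; omega, ih (st+1)⟩
    · simpa using ih (st+1)

-- A's forward punctuation scan = first element ≥ pos of B's index list
theorem pvNextEqAux (sl : List Char) (fuel : Nat) :
    ∀ pos : Int, 0 ≤ pos → ((sl.length : Int) - pos).toNat < fuel →
      find_next_punctuation sl pos = pvNextB (pvPunctOf sl 0) pos := by
  induction fuel with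
  | zero => intro pos _ h; omega
  | succ fu ih =>
    intro pos hp hfu
    by_cases hn : (sl.length : Int) ≤ pos
    · rw [find_next_punctuation, PySem.List.pyRange_one_eq_nil hn]
      rw [pvNextB]
      simp only [List.find?_nil]
      symm
      rw [List.find?_eq_none]
      intro p hmem
      have := (pvMemPunctOf sl 0 p).mp hmem
      simp only [decide_eq_true_eq]
      omega
    · rw [not_le] at hn
      rw [find_next_punctuation, PySem.List.pyRange_one_cons hn]
      by_cases hq : pvIsPunctA (PySem.List.pyGetD sl pos ' ') = true
      · rw [List.find?_cons_of_pos (by simpa using hq)]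
        rw [pvNextB, pvFindSorted (pvPunctOf sl 0) _ pos (pvPunctOfSorted sl 0)
          ((pvMemPunctOf sl 0 pos).mpr ⟨hp, by omega, by rw [sub_zero]; exact hq⟩)
          (by simp) (fun x hx => by simp; omega)]
      · rw [List.find?_cons_of_neg (by simpa using hq)]
        have hrec : (PySem.List.pyRange (pos+1) (sl.length : Int) 1).find?
            (fun i => pvIsPunctA (PySem.List.pyGetD sl i ' ')) =
            find_next_punctuation sl (pos+1) := rfl
        rw [hrec, ih (pos+1) (by omega) (by omega), pvNextB, pvNextB]
        apply pvFindCongr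
        intro x hx
        have hb := (pvMemPunctOf sl 0 x).mp hx
        have hne : x ≠ pos := by
          rintro rfl
          rw [sub_zero] at hb
          exact hq hb.2.2
        simp only [decide_eq_decide]
        omega

theorem pvNextEq (sl : List Char) (pos : Int) (hp : 0 ≤ pos) :
    find_next_punctuation sl pos = pvNextB (pvPunctOf sl 0) pos :=
  pvNextEqAux sl (((sl.length : Int) - pos).toNat + 1) pos hp (by omega)

-- B's keep-last fold = find? on the reversed index list
theorem pvPrevBEq (punct : List Int) (pos : Int) :
    pvPrevB punct pos = punct.reverse.find? (fun p => decide (1 ≤ p ∧ p < pos)) := by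
  rw [pvPrevB, pvFoldLast punct (fun p => 1 ≤ p ∧ p < pos) none]
  cases punct.reverse.find? (fun p => decide (1 ≤ p ∧ p < pos)) <;> rfl

-- A's backward punctuation scan = last element of B's index list in [1, pos)
theorem pvPrevEqAux (sl : List Char) (fuel : Nat) :
    ∀ pos : Int, pos.toNat < fuel →
      find_last_punctuation sl pos = pvPrevB (pvPunctOf sl 0) pos := by
  induction fuel with
  | zero => intro pos h; omega
  | succ fu ih =>
    intro pos hfu
    rw [pvPrevBEq]
    by_cases h1 : pos - 1 ≤ 0
    · rw [find_last_punctuation, PySem.List.pyRange_neg_one_eq_nil h1]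
      simp only [List.find?_nil]
      symm
      rw [List.find?_eq_none]
      intro p hmem
      simp only [decide_eq_true_eq]
      omega
    · rw [not_le] at h1
      rw [find_last_punctuation, PySem.List.pyRange_neg_one_cons (by omega : (0:Int) < pos - 1)]
      by_cases hq : pvIsPunctA (PySem.List.pyGetD sl (pos-1) ' ') = true
      · have hlt : pos - 1 < (sl.length : Int) := by
          by_contra hge
          rw [pvGetDOut sl (pos-1) (by omega)] at hq
          exact absurd hq (by decide)
        rw [List.find?_cons_of_pos (by simpa using hq)]
        rw [pvFindSortedD _ _ (pos-1)
          ((List.pairwise_reverse).mpr (by simpa using pvPunctOfSorted sl 0))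
          (by simp only [List.mem_reverse]
              exact (pvMemPunctOf sl 0 (pos-1)).mpr ⟨by omega, by omega, by rw [sub_zero]; exact hq⟩)
          (by simp; omega) (fun x hx => by simp; omega)]
      · rw [List.find?_cons_of_neg (by simpa using hq)]
        have hrec : (PySem.List.pyRange (pos-1-1) 0 (-1)).find?
            (fun i => pvIsPunctA (PySem.List.pyGetD sl i ' ')) =
            find_last_punctuation sl (pos-1) := rfl
        rw [hrec, ih (pos-1) (by omega), pvPrevBEq]
        apply pvFindCongr
        intro x hx
        rw [List.mem_reverse] at hx
        have hb := (pvMemPunctOf sl 0 x).mp hx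
        have hne : x ≠ pos - 1 := by
          rintro rfl
          rw [sub_zero] at hb
          exact hq hb.2.2
        simp only [decide_eq_decide]
        omega

theorem pvPrevEq (sl : List Char) (pos : Int) :
    find_last_punctuation sl pos = pvPrevB (pvPunctOf sl 0) pos :=
  pvPrevEqAux sl (pos.toNat + 1) pos (by omega)

-- the two sentence loops agree step by step
theorem pvLoopEq (sl tail : List Char) :
    ∀ (fuel : Nat) (pos : Int), 0 ≤ pos →
      pvLoopA sl tail fuel pos = pvLoopB sl (pvPunctOf sl 0) tail fuel pos := by
  intro fuel
  induction fuel with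
  | zero => intro pos _; rfl
  | succ fu ih =>
    intro pos hp
    simp only [pvLoopA, pvLoopB]
    rw [pvNextEq sl pos hp, pvPrevEq sl pos]
    cases he : pvNextB (pvPunctOf sl 0) pos with
    | none => rfl
    | some e =>
      cases hb : pvPrevB (pvPunctOf sl 0) pos with
      | none => rfl
      | some b =>
        have hbprop : 1 ≤ b ∧ b < pos := by
          rw [pvPrevBEq] at hb
          simpa using List.find?_some hb
        have heprop : pos ≤ e := by
          rw [pvNextB] at he
          simpa using List.find?_some he
        dsimp only
        rw [if_pos (by omega : e ≠ 0 ∧ b ≠ 0)]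
        by_cases hin : PySem.Chars.isIn (PySem.List.slice sl (some b) (some e)) tail = true
        · simp only [hin, if_true]
        · simp only [hin, if_false, Bool.false_eq_true]
          exact ih (e+1) (by omega)

-- ---------- the longest-common-prefix function and its characterisation ----------
def pvLcp : List Char → List Char → Nat
  | a::as, b::bs => if a = b then pvLcp as bs + 1 else 0
  | _, _ => 0

theorem pvLcp_le_right : ∀ (a b : List Char), pvLcp a b ≤ b.length := by
  intro a
  induction a with
  | nil => intro b; cases b <;> simp [pvLcp]
  | cons x as ih =>
    intro b
    cases b with
    | nil => simp [pvLcp]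
    | cons y bs =>
      simp only [pvLcp, List.length_cons]
      split
      · have := ih bs; omega
      · omega

theorem pvLcp_getD : ∀ (a b : List Char) (t : Nat), t < pvLcp a b →
    a.getD t ' ' = b.getD t ' ' := by
  intro a
  induction a with
  | nil => intro b t ht; cases b <;> simp [pvLcp] at ht
  | cons x as ih =>
    intro b t ht
    cases b with
    | nil => simp [pvLcp] at ht
    | cons y bs =>
      simp only [pvLcp] at ht
      split at ht
      · cases t with
        | zero => simpa [List.getD]
        | succ t' => simpa [List.getD] using ih bs t' (by omega)
      · omega

theorem pvLe_lcp : ∀ (a b : List Char) (m : Nat), m ≤ a.length → m ≤ b.length →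
    (∀ t, t < m → a.getD t ' ' = b.getD t ' ') → m ≤ pvLcp a b := by
  intro a
  induction a with
  | nil => intro b m hm _ _; simp at hm; omega
  | cons x as ih =>
    intro b m hma hmb hall
    cases b with
    | nil => simp at hmb; omega
    | cons y bs =>
      cases m with
      | zero => omega
      | succ m' =>
        have hxy : x = y := by simpa [List.getD] using hall 0 (by omega)
        simp only [pvLcp, if_pos hxy]
        have := ih bs m' (by simpa using hma) (by simpa using hmb)
          (fun t ht => by simpa [List.getD] using hall (t+1) (by omega))
        omega

theorem pvLcp_ne : ∀ (a b : List Char), pvLcp a b < a.length → pvLcp a b < b.length →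
    a.getD (pvLcp a b) ' ' ≠ b.getD (pvLcp a b) ' ' := by
  intro a
  induction a with
  | nil => intro b h _; cases b <;> simp [pvLcp] at h
  | cons x as ih =>
    intro b ha hb
    cases b with
    | nil => simp [pvLcp] at hb
    | cons y bs =>
      by_cases hxy : x = y
      · simp only [pvLcp, if_pos hxy] at ha hb ⊢
        simpa [List.getD] using ih bs (by simpa using ha) (by simpa using hb)
      · simpa [pvLcp, hxy, List.getD] using hxy

theorem pvGetD_drop (s : List Char) (i t : Nat) :
    (s.drop i).getD t ' ' = s.getD (i + t) ' ' := by
  rw [List.getD_eq_getElem?_getD, List.getD_eq_getElem?_getD, List.getElem?_drop]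

theorem pvGetD_rev (s : List Char) (t : Nat) (ht : t < s.length) :
    s.reverse.getD t ' ' = s.getD (s.length - 1 - t) ' ' := by
  rw [List.getD_eq_getElem (s.reverse) ' ' (by simpa using ht),
    List.getD_eq_getElem s ' ' (by omega), List.getElem_reverse]

-- the extension loop, started at a sound lower bound, computes the exact lcp
theorem pvZext_eq (s : List Char) (i : Nat) (hi : 1 ≤ i) :
    ∀ (fuel zi : Nat), pvLcp s (s.drop i) - zi < fuel → zi ≤ pvLcp s (s.drop i) →
      pvZext s i zi = pvLcp s (s.drop i) := by
  intro fuel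
  induction fuel with
  | zero => intro zi h _; omega
  | succ fu ih =>
    intro zi hfu hle
    have hLd : pvLcp s (s.drop i) ≤ s.length - i := by
      have := pvLcp_le_right s (s.drop i)
      simpa using this
    rcases eq_or_lt_of_le hle with heq | hlt
    · have hng : ¬ (i + zi < s.length ∧ s.getD zi ' ' = s.getD (i + zi) ' ') := by
        rintro ⟨h1, h2⟩
        have hne := pvLcp_ne s (s.drop i) (by omega) (by simp; omega)
        rw [pvGetD_drop] at hne
        rw [← heq] at hne
        exact hne h2
      rw [pvZext, dif_neg hng]
      exact heq
    · have hps : (i + zi < s.length ∧ s.getD zi ' ' = s.getD (i + zi) ' ') := by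
        constructor
        · omega
        · have := pvLcp_getD s (s.drop i) zi hlt
          rwa [pvGetD_drop] at this
      rw [pvZext, dif_pos hps]
      exact ih (zi+1) (by omega) (by omega)

-- invariant of the Z-algorithm's main fold: every filled entry is the exact lcp
theorem pvZfold (s : List Char) :
    ∀ (cnt i : Nat) (z : List Nat) (l r : Nat),
      1 ≤ i → i + cnt ≤ s.length →
      z.length = s.length →
      (∀ j, 1 ≤ j → j < i → z.getD j 0 = pvLcp s (s.drop j)) →
      l < i → r ≤ s.length →
      (l < r → 1 ≤ l ∧ r - l ≤ pvLcp s (s.drop l)) →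
      (((List.range' i cnt).foldl (pvZstep s) (z, l, r)).1.length = s.length ∧
        ∀ j, 1 ≤ j → j < i + cnt →
          ((List.range' i cnt).foldl (pvZstep s) (z, l, r)).1.getD j 0 = pvLcp s (s.drop j)) := by
  intro cnt
  induction cnt with
  | zero =>
    intro i z l r _ _ hzl hzv _ _ _
    exact ⟨hzl, fun j hj1 hj2 => hzv j hj1 (by omega)⟩
  | succ cn ih =>
    intro i z l r hi hin hzl hzv hli hrn hbox
    rw [List.range'_succ, List.foldl_cons]
    have hiN : i < s.length := by omega
    -- the seed is a sound lower bound for the true lcp at i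
    have hseed : (if i < r then min (r - i) (z.getD (i - l) 0) else 0) ≤ pvLcp s (s.drop i) := by
      split
      · next hir =>
        have hlr : l < r := by omega
        obtain ⟨hl1, hbox2⟩ := hbox hlr
        have hzil : z.getD (i - l) 0 = pvLcp s (s.drop (i - l)) :=
          hzv (i - l) (by omega) (by omega)
        rw [hzil]
        apply pvLe_lcp
        · omega
        · simp; omega
        · intro t ht
          rw [pvGetD_drop]
          have h1 : s.getD t ' ' = s.getD (i - l + t) ' ' := by
            have := pvLcp_getD s (s.drop (i - l)) t (by omega)
            rwa [pvGetD_drop] at this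
          have h2 : s.getD (i - l + t) ' ' = s.getD (i + t) ' ' := by
            have := pvLcp_getD s (s.drop l) (i - l + t) (by omega)
            rw [pvGetD_drop] at this
            rw [this]
            congr 1
            omega
          rw [h1, h2]
      · omega
    have hzi : pvZext s i (if i < r then min (r - i) (z.getD (i - l) 0) else 0)
        = pvLcp s (s.drop i) :=
      pvZext_eq s i hi (pvLcp s (s.drop i) + 1) _ (by omega) hseed
    have hstep : pvZstep s (z, l, r) i =
        (z.set i (pvLcp s (s.drop i)),
          if r < i + pvLcp s (s.drop i) then (i, i + pvLcp s (s.drop i)) else (l, r)) := by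
      simp only [pvZstep, hzi]
      split <;> rfl
    rw [hstep]
    have hLd : pvLcp s (s.drop i) ≤ s.length - i := by
      have := pvLcp_le_right s (s.drop i); simpa using this
    have hz'l : (z.set i (pvLcp s (s.drop i))).length = s.length := by
      simp [hzl]
    have hz'v : ∀ j, 1 ≤ j → j < i + 1 →
        (z.set i (pvLcp s (s.drop i))).getD j 0 = pvLcp s (s.drop j) := by
      intro j hj1 hj2
      rcases Nat.lt_or_ge j i with hj | hj
      · rw [List.getD_eq_getElem?_getD, List.getElem?_set_ne (by omega),
          ← List.getD_eq_getElem?_getD]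
        exact hzv j hj1 hj
      · have hji : j = i := by omega
        subst hji
        rw [List.getD_eq_getElem?_getD, List.getElem?_set_self (by omega)]
        rfl
    split
    · next hupd =>
      have := ih (i+1) (z.set i (pvLcp s (s.drop i))) i (i + pvLcp s (s.drop i))
        (by omega) (by omega) hz'l hz'v (by omega) (by omega)
        (fun h => ⟨by omega, by omega⟩)
      exact ⟨this.1, fun j hj1 hj2 => this.2 j hj1 (by omega)⟩
    · next hupd =>
      have := ih (i+1) (z.set i (pvLcp s (s.drop i))) l r
        (by omega) (by omega) hz'l hz'v (by omega) hrn hbox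
      exact ⟨this.1, fun j hj1 hj2 => this.2 j hj1 (by omega)⟩

theorem pvZfun_correct (s : List Char) (j : Nat) (hj1 : 1 ≤ j) (hjn : j < s.length) :
    (pvZfun s).getD j 0 = pvLcp s (s.drop j) := by
  have hn1 : 1 ≤ s.length := by omega
  have hmain := pvZfold s (s.length - 1) 1 (List.replicate s.length 0) 0 0
    (by omega) (by omega) (by simp) (by intro j h1 h2; omega) (by omega) (by omega)
    (by omega)
  rw [pvZfun, List.getD_eq_getElem?_getD, List.getElem?_set_ne (by omega),
    ← List.getD_eq_getElem?_getD]
  exact hmain.2 j hj1 (by omega)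

-- B's z-table condition at shift j*k ⟺ A's block equality of the j-th trailing copy
theorem pvSliceIffZ (sl : List Char) (j k : Int) (hk : 1 ≤ k) (hj : 1 ≤ j)
    (hjk : (j+1)*k ≤ (sl.length : Int)) :
    (PySem.List.slice sl (some ((sl.length : Int) - (j+1)*k)) (some ((sl.length : Int) - j*k))
        = sl.drop (sl.length - k.toNat))
      ↔ k.toNat ≤ pvLcp sl.reverse (sl.reverse.drop (j*k).toNat) := by
  have hexp : (j+1)*k = j*k + k := by ring
  have hjk0 : 1*k ≤ j*k := by
    apply mul_le_mul_of_nonneg_right _ (by omega)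
    omega
  have h1k : 1*k = k := by ring
  -- the bridge: k ≤ lcp of the reversed string against its shift by j*k
  have hbridge : (k.toNat ≤ pvLcp sl.reverse (sl.reverse.drop (j*k).toNat)) ↔
      (∀ t, t < k.toNat →
        sl.getD (sl.length - 1 - t) ' ' = sl.getD (sl.length - 1 - (j*k).toNat - t) ' ') := by
    constructor
    · intro h t ht
      have h1 := pvLcp_getD sl.reverse (sl.reverse.drop (j*k).toNat) t (by omega)
      rw [pvGetD_drop, pvGetD_rev sl t (by omega), pvGetD_rev sl ((j*k).toNat + t) (by omega)] at h1
      rw [show sl.length - 1 - ((j*k).toNat + t) = sl.length - 1 - (j*k).toNat - t from by omega] at h1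
      exact h1
    · intro h
      apply pvLe_lcp
      · simp; omega
      · simp; omega
      · intro t ht
        rw [pvGetD_drop, pvGetD_rev sl t (by omega), pvGetD_rev sl ((j*k).toNat + t) (by omega),
          show sl.length - 1 - ((j*k).toNat + t) = sl.length - 1 - (j*k).toNat - t from by omega]
        exact h t ht
  rw [hbridge, PySem.List.slice_toNat _ (by omega) (by omega)]
  have hlen1 : ((sl.drop (((sl.length : Int) - (j+1)*k).toNat)).take
      ((((sl.length : Int) - j*k).toNat) - (((sl.length : Int) - (j+1)*k).toNat))).length
      = k.toNat := by
    simp only [List.length_take, List.length_drop]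
    omega
  have hlen2 : (sl.drop (sl.length - k.toNat)).length = k.toNat := by
    simp only [List.length_drop]
    omega
  constructor
  · intro h t ht
    have hidx : k.toNat - 1 - t < ((sl.drop (((sl.length : Int) - (j+1)*k).toNat)).take
        ((((sl.length : Int) - j*k).toNat) - (((sl.length : Int) - (j+1)*k).toNat))).length := by
      omega
    have hx := List.getElem_of_eq h hidx
    simp only [List.getElem_take, List.getElem_drop] at hx
    have hxD : sl.getD ((((sl.length : Int) - (j+1)*k).toNat) + (k.toNat - 1 - t)) ' '
        = sl.getD (sl.length - k.toNat + (k.toNat - 1 - t)) ' ' := by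
      rw [List.getD_eq_getElem sl ' ' (by omega), List.getD_eq_getElem sl ' ' (by omega)]
      exact hx
    rw [show sl.length - 1 - t = sl.length - k.toNat + (k.toNat - 1 - t) from by omega,
      show sl.length - 1 - (j*k).toNat - t
          = (((sl.length : Int) - (j+1)*k).toNat) + (k.toNat - 1 - t) from by omega]
    exact hxD.symm
  · intro h
    apply List.ext_getElem (by omega)
    intro u hu1 hu2
    rw [hlen1] at hu1
    have hx := h (k.toNat - 1 - u) (by omega)
    rw [show sl.length - 1 - (k.toNat - 1 - u) = sl.length - k.toNat + u from by omega,
      show sl.length - 1 - (j*k).toNat - (k.toNat - 1 - u)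
          = (((sl.length : Int) - (j+1)*k).toNat) + u from by omega] at hx
    simp only [List.getElem_take, List.getElem_drop]
    rw [← List.getD_eq_getElem sl ' '
        (show (((sl.length : Int) - (j+1)*k).toNat) + u < sl.length from by omega),
      ← List.getD_eq_getElem sl ' '
        (show sl.length - k.toNat + u < sl.length from by omega)]
    exact hx.symm

-- endswith on the already-stripped prefix = the arithmetic block condition
theorem pvCEq (sl : List Char) (k j : Int) (hk : 1 ≤ k) (_hkn : 2*k ≤ (sl.length:Int))
    (hj : 1 ≤ j) (hjk : j*k ≤ (sl.length:Int)) :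
    (PySem.Chars.endswith (sl.take (((sl.length:Int) - j*k).toNat))
        (sl.drop (sl.length - k.toNat)) = true)
    ↔ ((j+1)*k ≤ (sl.length:Int) ∧
        PySem.List.slice sl (some ((sl.length:Int)-(j+1)*k)) (some ((sl.length:Int)-j*k))
          = sl.drop (sl.length - k.toNat)) := by
  have hexp : (j+1)*k = j*k + k := by ring
  have hjk0 : 1*k ≤ j*k := by
    apply mul_le_mul_of_nonneg_right _ (by omega)
    omega
  have hlk : (sl.drop (sl.length - k.toNat)).length = k.toNat := by simp; omega
  have hst : (sl.take (((sl.length:Int) - j*k).toNat)).length = ((sl.length:Int) - j*k).toNat := by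
    simp; omega
  rw [PySem.Chars.endswith_iff, List.suffix_iff_eq_drop, hlk, hst]
  constructor
  · intro h
    have hle : k.toNat ≤ (((sl.length:Int) - j*k).toNat) := by
      by_contra hc
      have := congrArg List.length h
      simp only [hlk, List.length_drop, List.length_take] at this
      omega
    refine ⟨by omega, ?_⟩
    rw [PySem.List.slice_toNat _ (by omega) (by omega)]
    rw [List.drop_take] at h
    rw [show (((sl.length:Int))-(j+1)*k).toNat
          = (((sl.length:Int)) - j*k).toNat - k.toNat from by omega]
    exact h.symm
  · rintro ⟨h1, h2⟩
    have hle : k.toNat ≤ (((sl.length:Int) - j*k).toNat) := by omega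
    rw [PySem.List.slice_toNat _ (by omega) (by omega)] at h2
    rw [List.drop_take]
    rw [show (((sl.length:Int))-(j+1)*k).toNat
          = (((sl.length:Int)) - j*k).toNat - k.toNat from by omega] at h2
    exact h2.symm

-- A's repeated suffix stripping and B's z-table counting produce the same cut, in lockstep
theorem pvJoint (sl lcs : List Char) (z : List Nat) (k : Int) (hk : 1 ≤ k)
    (hkn : 2*k ≤ (sl.length:Int))
    (hlcs : lcs = sl.drop (sl.length - k.toNat))
    (hz : ∀ m : Nat, 1 ≤ m → m < sl.length →
      z.getD m 0 = pvLcp sl.reverse (sl.reverse.drop m)) :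
    ∀ (fuel : Nat) (j : Int), 1 ≤ j → j*k ≤ (sl.length:Int) →
      (((sl.length:Int) - j*k).toNat < fuel) →
      ((pvStripA k lcs (sl.take (((sl.length:Int) - j*k).toNat))).length : Int)
        = (sl.length:Int) - (pvRepsB z (sl.length:Int) k fuel j) * k := by
  intro fuel
  induction fuel with
  | zero => intro j _ _ h; omega
  | succ fu ih =>
    intro j hj hjk hfu
    have hexp : (j+1)*k = j*k + k := by ring
    have hjk0 : 1*k ≤ j*k := by
      apply mul_le_mul_of_nonneg_right _ (by omega)
      omega
    -- the z-table condition of B ⟺ the block condition of A's j-th strip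
    have hCiff : ((j + 1) * k ≤ (sl.length:Int) ∧
          k ≤ ((z.getD ((j * k).toNat) 0 : Nat) : Int)) ↔
        ((j+1)*k ≤ (sl.length:Int) ∧
          PySem.List.slice sl (some ((sl.length:Int)-(j+1)*k)) (some ((sl.length:Int)-j*k))
            = sl.drop (sl.length - k.toNat)) := by
      by_cases hC1 : (j+1)*k ≤ (sl.length:Int)
      · have hzjk : z.getD ((j*k).toNat) 0 = pvLcp sl.reverse (sl.reverse.drop (j*k).toNat) :=
          hz ((j*k).toNat) (by omega) (by omega)
        constructor
        · rintro ⟨h1, h2⟩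
          refine ⟨h1, (pvSliceIffZ sl j k hk hj hC1).mpr ?_⟩
          rw [hzjk] at h2
          omega
        · rintro ⟨h1, h2⟩
          refine ⟨h1, ?_⟩
          have := (pvSliceIffZ sl j k hk hj hC1).mp h2
          rw [hzjk]
          omega
      · simp [hC1]
    by_cases hC : ((j+1)*k ≤ (sl.length:Int) ∧
        PySem.List.slice sl (some ((sl.length:Int)-(j+1)*k)) (some ((sl.length:Int)-j*k))
          = sl.drop (sl.length - k.toNat))
    · have hend := (pvCEq sl k j hk hkn hj hjk).mpr hC
      rw [← hlcs] at hend
      simp only [pvRepsB, if_pos (hCiff.mpr hC)]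
      rw [pvStripA, dif_pos ⟨hk, by
          rw [hlcs]
          intro hnil
          have := congrArg List.length hnil
          simp at this
          omega, hend⟩]
      have hsl : PySem.List.slice (sl.take (((sl.length:Int) - j*k).toNat)) none (some (-k))
          = sl.take (((sl.length:Int) - (j+1)*k).toNat) := by
        rw [show -k = -((k.toNat : Nat) : Int) from by omega,
            PySem.List.slice_to_neg_natCast _ _ (by omega), List.take_take]
        congr 1
        simp only [List.length_take]
        omega
      rw [hsl]
      exact ih (j+1) (by omega) hC.1 (by omega)
    · simp only [pvRepsB, if_neg (fun h => hC (hCiff.mp h))]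
      have hnotend : ¬ (PySem.Chars.endswith (sl.take (((sl.length:Int) - j*k).toNat)) lcs = true) := by
        intro hend
        rw [hlcs] at hend
        exact hC ((pvCEq sl k j hk hkn hj hjk).mp hend)
      rw [pvStripA, dif_neg (by rintro ⟨_, _, h3⟩; exact hnotend h3)]
      simp only [List.length_take]
      omega

-- entry: A's loop always strips the first copy (lcs is a suffix of sl by construction)
theorem pvStripEntry (sl lcs : List Char) (z : List Nat) (k : Int) (hk : 1 ≤ k)
    (hkn : 2*k ≤ (sl.length:Int))
    (hlcs : lcs = sl.drop (sl.length - k.toNat))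
    (hz : ∀ m : Nat, 1 ≤ m → m < sl.length →
      z.getD m 0 = pvLcp sl.reverse (sl.reverse.drop m)) :
    ((pvStripA k lcs sl).length : Int)
      = (sl.length:Int)
        - (pvRepsB z (sl.length:Int) k ((sl.length:Int).toNat + 1) 1) * k := by
  have h1k : 1*k = k := by ring
  have hnil : lcs ≠ [] := by
    rw [hlcs]
    intro h
    have := congrArg List.length h
    simp at this
    omega
  have hend : PySem.Chars.endswith sl lcs = true := by
    rw [PySem.Chars.endswith_iff, hlcs]
    exact List.drop_suffix _ _
  rw [pvStripA, dif_pos ⟨hk, hnil, hend⟩]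
  have hsl : PySem.List.slice sl none (some (-k)) = sl.take (((sl.length:Int) - 1*k).toNat) := by
    rw [show -k = -((k.toNat : Nat) : Int) from by omega,
        PySem.List.slice_to_neg_natCast _ _ (by omega)]
    congr 1
    omega
  rw [hsl]
  exact pvJoint sl lcs z k hk hkn hlcs hz _ 1 (by omega) (by omega) (by omega)

theorem pvFoldLastNone (l : List Int) (P : Int → Prop) [DecidablePred P] :
    l.foldl (fun a k => if P k then some k else a) none
      = l.reverse.find? (fun k => decide (P k)) := by
  rw [pvFoldLast]
  cases l.reverse.find? (fun k => decide (P k)) <;> rfl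

-- A's char-by-char tail comparison = block comparison, for each candidate length
theorem pvSameIff (sl : List Char) (k : Int) (hk : 1 ≤ k) (h2 : 2*k ≤ (sl.length : Int)) :
    ((PySem.List.pyRange 0 k 1).all (fun i =>
        PySem.List.pyGetD sl ((sl.length : Int) - k - i - 1) ' ' ==
        PySem.List.pyGetD sl ((sl.length : Int) - i - 1) ' '))
    = (PySem.List.slice sl (some ((sl.length : Int) - 2*k)) (some ((sl.length : Int) - k))
        == PySem.List.slice sl (some ((sl.length : Int) - k)) none) := by
  rw [Bool.eq_iff_iff]
  simp only [List.all_eq_true, beq_iff_eq, PySem.List.mem_pyRange_one]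
  rw [PySem.List.slice_toNat _ (by omega) (by omega), PySem.List.slice_from _ (by omega)]
  constructor
  · intro h
    apply List.ext_getElem
    · simp; omega
    · intro j hj1 hj2
      have hj : j < k.toNat := by
        simp only [List.length_take, List.length_drop] at hj1; omega
      have hx := h (k - 1 - j) ⟨by omega, by omega⟩
      rw [PySem.List.pyGetD_eq_getElem sl ' ' (by omega) (by omega),
          PySem.List.pyGetD_eq_getElem sl ' ' (by omega) (by omega)] at hx
      simp only [List.getElem_take, List.getElem_drop]
      convert hx using 2 <;> omega
  · intro h i hi
    obtain ⟨hi0, hik⟩ := hi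
    have hj : (k - 1 - i).toNat < ((sl.drop ((((sl.length:Int)) - 2*k).toNat)).take
        ((((sl.length:Int)) - k).toNat - (((sl.length:Int)) - 2*k).toNat)).length := by
      simp only [List.length_take, List.length_drop]; omega
    have hx := List.getElem_of_eq h hj
    simp only [List.getElem_take, List.getElem_drop] at hx
    rw [PySem.List.pyGetD_eq_getElem sl ' ' (by omega) (by omega),
        PySem.List.pyGetD_eq_getElem sl ' ' (by omega) (by omega)]
    convert hx using 2 <;> omega

theorem pvMainEq (s : String) (m : Int) (hm : 1 ≤ m) :
    truncate_repetitions s m = truncate_repetitions_alt s m := by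
  simp only [truncate_repetitions, truncate_repetitions_alt]
  generalize PySem.Chars.lower s.toList = sl
  by_cases hlt : (sl.length : Int) < 2*m
  · rw [if_pos hlt, if_pos hlt]
  · rw [if_neg hlt, if_neg hlt]
    rw [not_lt] at hlt
    -- floor-division facts
    have hfd := PySem.Int.floordiv_mul_add_mod (sl.length : Int) 2
    have hm0 := PySem.Int.mod_nonneg (sl.length : Int) (by omega : (0:Int) < 2)
    have hm2 := PySem.Int.mod_lt (sl.length : Int) (by omega : (0:Int) < 2)
    have hz : ∀ mm : Nat, 1 ≤ mm → mm < sl.length →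
        (pvZfun sl.reverse).getD mm 0 = pvLcp sl.reverse (sl.reverse.drop mm) := by
      intro mm h1 h2
      exact pvZfun_correct sl.reverse mm h1 (by simpa using h2)
    -- A's per-candidate test agrees with B's z-table lookup on every candidate
    have hfk : (PySem.List.pyRange m (PySem.Int.floordiv (sl.length : Int) 2) 1).foldl
        (fun acc rep_len =>
          let same := (PySem.List.pyRange 0 rep_len 1).all
            (fun i => PySem.List.pyGetD sl ((sl.length : Int) - rep_len - i - 1) ' ' ==
              PySem.List.pyGetD sl ((sl.length : Int) - i - 1) ' ')
          if same then some rep_len else acc) none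
        = (PySem.List.pyRange m (PySem.Int.floordiv (sl.length : Int) 2) 1).foldl
          (fun acc cand =>
            if cand ≤ (((pvZfun sl.reverse).getD cand.toNat 0 : Nat) : Int) then some cand
            else acc) none := by
      apply PySem.List.foldl_congr_mem
      intro acc k hkmem
      rw [PySem.List.mem_pyRange_one] at hkmem
      have hk1 : 1 ≤ k := by omega
      have h2k : 2*k ≤ (sl.length : Int) := by omega
      have hzk : (pvZfun sl.reverse).getD k.toNat 0
          = pvLcp sl.reverse (sl.reverse.drop k.toNat) := hz k.toNat (by omega) (by omega)
      have hslice : PySem.List.slice sl (some ((sl.length : Int) - k)) none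
          = sl.drop (sl.length - k.toNat) := by
        rw [PySem.List.slice_from _ (by omega)]
        congr 1
        omega
      have hcond : ((PySem.List.pyRange 0 k 1).all (fun i =>
          PySem.List.pyGetD sl ((sl.length : Int) - k - i - 1) ' ' ==
          PySem.List.pyGetD sl ((sl.length : Int) - i - 1) ' '))
          = decide (k ≤ (((pvZfun sl.reverse).getD k.toNat 0 : Nat) : Int)) := by
        rw [pvSameIff sl k hk1 h2k]
        rw [Bool.eq_iff_iff, beq_iff_eq, decide_eq_true_eq]
        have h21 : (1+1)*k = 2*k := by ring
        have h11 : (1:Int)*k = k := by ring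
        have hsz := pvSliceIffZ sl 1 k hk1 (by omega) (by rw [h21]; exact h2k)
        rw [h21, h11] at hsz
        rw [hslice, hsz, hzk]
        omega
      simp only [hcond]
      by_cases hdec : k ≤ (((pvZfun sl.reverse).getD k.toNat 0 : Nat) : Int) <;> simp [hdec]
    rw [hfk]
    cases hko : (PySem.List.pyRange m (PySem.Int.floordiv (sl.length : Int) 2) 1).foldl
        (fun acc cand =>
          if cand ≤ (((pvZfun sl.reverse).getD cand.toNat 0 : Nat) : Int) then some cand
          else acc) none with
    | none => rfl
    | some k =>
      have hmem : k ∈ PySem.List.pyRange m (PySem.Int.floordiv (sl.length : Int) 2) 1 := by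
        rw [pvFoldLastNone (P := fun c => c ≤ (((pvZfun sl.reverse).getD c.toNat 0 : Nat) : Int))]
          at hko
        have := List.mem_of_find?_eq_some hko
        rwa [List.mem_reverse] at this
      rw [PySem.List.mem_pyRange_one] at hmem
      have hk1 : 1 ≤ k := by omega
      have h2k : 2*k ≤ (sl.length : Int) := by omega
      dsimp only
      -- the two lcs expressions are the same list
      have hlcsA : PySem.List.slice sl (some (-k)) none = sl.drop (sl.length - k.toNat) := by
        rw [show -k = -((k.toNat : Nat) : Int) from by omega,
          PySem.List.slice_from_neg_natCast _ _ (by omega)]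
      rw [hlcsA]
      -- the stripped length = the counted cut
      have hcut := pvStripEntry sl (sl.drop (sl.length - k.toNat)) (pvZfun sl.reverse) k
        hk1 h2k rfl hz
      rw [hcut]
      -- the punctuation index list is pvPunctOf
      have hpunct : ((PySem.List.enumerate sl 0).filter (fun ic => pvIsPunctB ic.2)).map (·.1)
          = pvPunctOf sl 0 := rfl
      rw [hpunct]
      -- the common cut is nonnegative (it is a list length on the A side)
      have hpos : 0 ≤ (sl.length : Int)
          - pvRepsB (pvZfun sl.reverse) (sl.length : Int) k ((sl.length : Int).toNat + 1) 1 * k := by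
        rw [← hcut]
        positivity
      rw [pvLoopEq sl _ ((sl.length : Int).toNat + 1) _ hpos]

-- ===== VERDICT (by name: the statement is the Claim_ definition above) =====
theorem truncate_repetitions_spec : Claim_equal_truncate_repetitions := by
  intro s min_len _ hpre
  exact pvMainEq s min_len hpre
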